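-- pv_equiv track=rewrite | github.com/Vergil0327/leetcode-history | Sorting/2551. Put Marbles in Bags/solution.py | putMarbles
-- ===== SOURCE A (Python) =====
-- from typing import List
--
-- def putMarbles(weights: List[int], k: int) -> int:
--     n = len(weights)
--     splits = []
--     for i in range(n-1):
--         splits.append(weights[i]+weights[i+1])
--     splits.sort()
--
--     # max k-1 cuts - min k-1 cuts
--     k -= 1
--     return sum(splits[len(splits)-k:]) - sum(splits[:k])
-- ===== SOURCE B (Python) =====
-- def _sum_smallest(xs, j):
--     """Sum of the j smallest elements of xs (all of them if j >= len(xs),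
--     0 if j <= 0), by iterative three-way-partition quickselect."""
--     total = 0
--     while j > 0 and xs:
--         if j >= len(xs):
--             return total + sum(xs)
--         pivot = xs[len(xs) // 2]
--         lo = [x for x in xs if x < pivot]
--         hi = [x for x in xs if x > pivot]
--         neq = len(xs) - len(lo) - len(hi)
--         if j <= len(lo):
--             xs = lo
--         elif j <= len(lo) + neq:
--             return total + sum(lo) + (j - len(lo)) * pivot
--         else:
--             total += sum(lo) + neq * pivot
--             xs, j = hi, j - len(lo) - neq
--     return total
--
--
-- def _sum_largest(xs, j):
--     """Sum of the j largest elements of xs, same scheme."""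
--     total = 0
--     while j > 0 and xs:
--         if j >= len(xs):
--             return total + sum(xs)
--         pivot = xs[len(xs) // 2]
--         lo = [x for x in xs if x < pivot]
--         hi = [x for x in xs if x > pivot]
--         neq = len(xs) - len(lo) - len(hi)
--         if j <= len(hi):
--             xs = hi
--         elif j <= len(hi) + neq:
--             return total + sum(hi) + (j - len(hi)) * pivot
--         else:
--             total += sum(hi) + neq * pivot
--             xs, j = lo, j - len(hi) - neq
--     return total
--
--
-- def putMarbles(weights, k):
--     splits = [a + b for a, b in zip(weights, weights[1:])]
--     return _sum_largest(splits, k - 1) - _sum_smallest(splits, k - 1)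
-- ===== Notes on version B (the rewrite author's own statement) =====
-- stated objective: alternative
-- what changed: B replaces A's sort of all pair-sums followed by slice-sums with an iterative three-way-partition quickselect that accumulates the sum of the k-1 smallest and k-1 largest pair-sums directly, never producing a sorted list (O(n) average partition recursion vs full O(n log n) sort).
-- outside the precondition, e.g. on putMarbles([1, 2, 3], 0): A returns -3, B returns 0; on putMarbles([3, 1, 2, 4], 6): A returns -3, B returns 0
import Mathlib
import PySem

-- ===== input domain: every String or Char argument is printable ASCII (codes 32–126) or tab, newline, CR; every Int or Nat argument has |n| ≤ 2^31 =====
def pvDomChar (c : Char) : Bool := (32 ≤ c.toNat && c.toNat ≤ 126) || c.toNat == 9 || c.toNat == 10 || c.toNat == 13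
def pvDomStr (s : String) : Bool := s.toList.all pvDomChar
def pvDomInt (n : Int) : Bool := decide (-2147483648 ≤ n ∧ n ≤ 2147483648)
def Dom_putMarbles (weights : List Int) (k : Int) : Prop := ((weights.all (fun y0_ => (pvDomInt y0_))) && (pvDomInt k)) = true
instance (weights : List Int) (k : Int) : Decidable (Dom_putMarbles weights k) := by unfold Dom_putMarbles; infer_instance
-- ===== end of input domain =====

-- B replaces A's full sort of the pair-sums by an iterative three-way-partition quickselect
-- that sums the k-1 largest and k-1 smallest pair-sums directly (alternative algorithm).

-- ===== PORT A =====
def putMarbles (weights : List Int) (k : Int) : Int :=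
  let n : Int := weights.length
  let splits : List Int :=
    (PySem.List.pyRange 0 (n - 1) 1).foldl
      (fun acc i => acc ++ [PySem.List.pyGetD weights i 0 + PySem.List.pyGetD weights (i + 1) 0]) []
  let splits := PySem.List.sorted splits (fun x => x) false
  let k1 := k - 1
  (PySem.List.slice splits (some ((splits.length : Int) - k1)) none).sum
    - (PySem.List.slice splits none (some k1)).sum

-- ===== PORT B =====
-- _sum_smallest: while-loop with accumulator; xs[len(xs)//2] is always in range (getD is exact there)
def sumSmallestAux (xs : List Int) (j : Int) (total : Int) : Int :=
  if hx : 0 < j ∧ xs ≠ [] then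
    if (xs.length : Int) ≤ j then total + xs.sum
    else
      let pivot := xs.getD (xs.length / 2) 0
      let lo := xs.filter (fun x => decide (x < pivot))
      let hi := xs.filter (fun x => decide (pivot < x))
      let neq : Int := (xs.length : Int) - lo.length - hi.length
      if j ≤ (lo.length : Int) then sumSmallestAux lo j total
      else if j ≤ (lo.length : Int) + neq then total + lo.sum + (j - lo.length) * pivot
      else sumSmallestAux hi (j - (lo.length : Int) - neq) (total + lo.sum + neq * pivot)
  else total
termination_by xs.length
decreasing_by
  all_goals
    have hmem : xs.getD (xs.length / 2) 0 ∈ xs := by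
      rw [List.getD_eq_getElem _ _ (Nat.div_lt_self (List.length_pos_of_ne_nil hx.2) one_lt_two)]
      exact List.getElem_mem _
    simp only [List.length_unattach]
    exact lt_of_lt_of_le
      (List.length_filter_lt_length_iff_exists.mpr ⟨⟨_, hmem⟩, List.mem_attach _ _, by simp⟩)
      (by simp)


-- _sum_largest: the same loop with the roles of lo and hi swapped
def sumLargestAux (xs : List Int) (j : Int) (total : Int) : Int :=
  if hx : 0 < j ∧ xs ≠ [] then
    if (xs.length : Int) ≤ j then total + xs.sum
    else
      let pivot := xs.getD (xs.length / 2) 0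
      let lo := xs.filter (fun x => decide (x < pivot))
      let hi := xs.filter (fun x => decide (pivot < x))
      let neq : Int := (xs.length : Int) - lo.length - hi.length
      if j ≤ (hi.length : Int) then sumLargestAux hi j total
      else if j ≤ (hi.length : Int) + neq then total + hi.sum + (j - hi.length) * pivot
      else sumLargestAux lo (j - (hi.length : Int) - neq) (total + hi.sum + neq * pivot)
  else total
termination_by xs.length
decreasing_by
  all_goals
    have hmem : xs.getD (xs.length / 2) 0 ∈ xs := by
      rw [List.getD_eq_getElem _ _ (Nat.div_lt_self (List.length_pos_of_ne_nil hx.2) one_lt_two)]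
      exact List.getElem_mem _
    simp only [List.length_unattach]
    exact lt_of_lt_of_le
      (List.length_filter_lt_length_iff_exists.mpr ⟨⟨_, hmem⟩, List.mem_attach _ _, by simp⟩)
      (by simp)


def putMarbles_alt (weights : List Int) (k : Int) : Int :=
  let splits := (weights.zip (PySem.List.slice weights (some 1) none)).map (fun p => p.1 + p.2)
  sumLargestAux splits (k - 1) 0 - sumSmallestAux splits (k - 1) 0

-- ===== PRECONDITION & SPEC =====
-- Pre_ excludes the bag counts k outside the problem's stated range 1..len(weights) on which A's
-- slice endpoints wrap only partially (2-n < k < 1 or n < k < 2n-1 for n = len(weights) >= 2):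
-- there A returns a sum over an accidental slice of the sorted pair-sums while B returns 0.
def Pre_putMarbles (weights : List Int) (k : Int) : Prop :=
  weights.length ≤ 1 ∨ (1 ≤ k ∧ k ≤ (weights.length : Int)) ∨
    k ≤ 2 - (weights.length : Int) ∨ 2 * (weights.length : Int) - 1 ≤ k
instance (weights : List Int) (k : Int) : Decidable (Pre_putMarbles weights k) := by
  unfold Pre_putMarbles; infer_instance
def pvWitness_putMarbles : List Int × Int := ([1, 3, 5, 1], 2)

def Spec_putMarbles (weights : List Int) (k : Int) (out : Int) : Prop := out = putMarbles_alt weights k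
instance (weights : List Int) (k : Int) (out : Int) : Decidable (Spec_putMarbles weights k out) := by unfold Spec_putMarbles; infer_instance

-- ===== CLAIM (what is proved, stated in full; the proofs are below) =====
def Claim_equal_putMarbles : Prop := ∀ (weights : List Int) (k : Int), Dom_putMarbles weights k → Pre_putMarbles weights k → Spec_putMarbles weights k (putMarbles weights k)

-- ===== LEMMAS AND PROOFS =====

def sAsc (xs : List Int) : List Int := PySem.List.sorted xs (fun x => x) false

lemma three_way_len (xs : List Int) (p : Int) :
    (xs.filter (fun x => decide (x < p))).length + xs.count p
      + (xs.filter (fun x => decide (p < x))).length = xs.length := by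
  induction xs with
  | nil => simp
  | cons a t ih =>
    simp only [List.filter_cons, List.count_cons]
    rcases lt_trichotomy a p with h | h | h
    · simp [h, not_lt_of_gt h, ne_of_lt h]; omega
    · simp [h]; omega
    · simp [h, not_lt_of_gt h, ne_of_gt h]; omega

lemma count_filter_zero (xs : List Int) (q : Int → Bool) (a : Int) (h : q a = false) :
    (xs.filter q).count a = 0 := by
  rw [List.count_eq_zero]
  intro hm
  have := List.of_mem_filter hm
  simp [h] at this

lemma count_sAsc (xs : List Int) (a : Int) : (sAsc xs).count a = xs.count a :=
  (PySem.List.sorted_perm xs _ _).count_eq a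

lemma sorted_decomp (xs : List Int) (p : Int) :
    sAsc xs = sAsc (xs.filter (fun x => decide (x < p)))
      ++ (List.replicate (xs.count p) p ++ sAsc (xs.filter (fun x => decide (p < x)))) := by
  rw [← List.append_assoc]
  apply List.Perm.eq_of_pairwise (fun a b _ _ hab hba => le_antisymm hab hba)
  · exact PySem.List.sorted_pairwise xs _
  · rw [List.pairwise_append]
    refine ⟨List.pairwise_append.mpr ⟨PySem.List.sorted_pairwise _ _,
        List.pairwise_replicate_of_refl, ?_⟩, PySem.List.sorted_pairwise _ _, ?_⟩
    · intro a ha b hb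
      have ha' := List.of_mem_filter ((PySem.List.mem_sorted _ _ _ a).mp ha)
      have hb' := List.eq_of_mem_replicate hb
      simp at ha'; omega
    · intro a ha b hb
      have hb' := List.of_mem_filter ((PySem.List.mem_sorted _ _ _ b).mp hb)
      simp at hb'
      rcases List.mem_append.mp ha with h | h
      · have ha' := List.of_mem_filter ((PySem.List.mem_sorted _ _ _ a).mp h)
        simp at ha'; omega
      · have ha' := List.eq_of_mem_replicate h; omega
  · refine ((PySem.List.sorted_perm xs _ _)).trans ?_
    rw [List.perm_iff_count]
    intro a
    simp only [List.count_append, List.count_replicate, count_sAsc]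
    rcases lt_trichotomy a p with h | h | h
    · rw [List.count_filter (by simpa using h), count_filter_zero _ _ _ (by simp; omega)]
      simp [ne_of_gt h]
    · subst h
      rw [count_filter_zero _ _ _ (by simp), count_filter_zero _ _ _ (by simp)]
      simp
    · rw [count_filter_zero _ _ _ (by simp; omega), List.count_filter (by simpa using h)]
      simp [ne_of_lt h]

lemma unattach_filter_lt (a : List Int) (f : Int) :
    (List.filter (fun x : {x // x ∈ a} => match x with | ⟨x, _⟩ => decide (x < f)) a.attach).unattach
      = a.filter (fun x => decide (x < f)) := by
  rw [List.unattach_filter (g := fun x => decide (x < f)) (hf := fun x h => rfl)]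
  simp

lemma unattach_filter_gt (a : List Int) (f : Int) :
    (List.filter (fun x : {x // x ∈ a} => match x with | ⟨x, _⟩ => decide (f < x)) a.attach).unattach
      = a.filter (fun x => decide (f < x)) := by
  rw [List.unattach_filter (g := fun x => decide (f < x)) (hf := fun x h => rfl)]
  simp

lemma sum_sAsc (xs : List Int) : (sAsc xs).sum = xs.sum := (PySem.List.sorted_perm xs _ _).sum_eq

lemma sumSmallestAux_spec (xs : List Int) (j total : Int) :
    sumSmallestAux xs j total = total + ((sAsc xs).take j.toNat).sum := by
  fun_induction sumSmallestAux xs j total with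
  | case1 a b c d e =>
    rw [List.take_of_length_le (by simp only [sAsc, PySem.List.length_sorted]; omega), sum_sAsc]
  | case2 a b c d e f lo h1 ih =>
    have hlo : lo = a.filter (fun x => decide (x < f)) := by
      simp only [lo]; exact unattach_filter_lt a f
    rw [hlo] at h1 ih
    rw [if_pos h1, ih, sorted_decomp a f,
        List.take_append_of_le_length (by simp only [sAsc, PySem.List.length_sorted]; omega)]
  | case3 a b c d e f lo hi nq h1 h2 =>
    have hlo : lo = a.filter (fun x => decide (x < f)) := by
      simp only [lo]; exact unattach_filter_lt a f
    have hhi : hi = a.filter (fun x => decide (f < x)) := by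
      simp only [hi]; exact unattach_filter_gt a f
    have hnq : nq = (a.length : Int) - (a.filter (fun x => decide (x < f))).length
        - (a.filter (fun x => decide (f < x))).length := by
      simp only [nq, hlo, hhi]
    rw [hlo] at h1
    rw [hnq, hlo] at h2
    have hp : f ∈ a := by
      show a.getD (a.length / 2) 0 ∈ a
      rw [List.getD_eq_getElem _ _ (Nat.div_lt_self (List.length_pos_of_ne_nil d.2) one_lt_two)]
      exact List.getElem_mem _
    have h3 := three_way_len a f
    have hcnt : 1 ≤ a.count f := List.one_le_count_iff.mpr hp
    rw [if_neg h1, if_pos (by omega), sorted_decomp a f]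
    have hLlen : (sAsc (a.filter (fun x => decide (x < f)))).length
        = (a.filter (fun x => decide (x < f))).length := by
      simp only [sAsc, PySem.List.length_sorted]
    rw [List.take_append, List.take_of_length_le (by rw [hLlen]; omega), hLlen,
        List.take_append, List.take_replicate, List.take_eq_nil_iff.mpr (by left; simp only [List.length_replicate]; omega),
        List.append_nil]
    have hmin : min (b.toNat - (a.filter (fun x => decide (x < f))).length) (a.count f)
        = b.toNat - (a.filter (fun x => decide (x < f))).length := by omega
    rw [hmin, List.sum_append, sum_sAsc, List.sum_replicate, nsmul_eq_mul]
    have hcast : ((b.toNat - (a.filter (fun x => decide (x < f))).length : Nat) : Int)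
        = b - (a.filter (fun x => decide (x < f))).length := by omega
    rw [hcast]
    ring
  | case4 a b c d e f lo hi nq h1 h2 ih =>
    have hlo : lo = a.filter (fun x => decide (x < f)) := by
      simp only [lo]; exact unattach_filter_lt a f
    have hhi : hi = a.filter (fun x => decide (f < x)) := by
      simp only [hi]; exact unattach_filter_gt a f
    have hnq : nq = (a.length : Int) - (a.filter (fun x => decide (x < f))).length
        - (a.filter (fun x => decide (f < x))).length := by
      simp only [nq, hlo, hhi]
    rw [hlo] at h1
    rw [hnq, hlo] at h2
    rw [hlo, hhi, hnq] at ih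
    have hp : f ∈ a := by
      show a.getD (a.length / 2) 0 ∈ a
      rw [List.getD_eq_getElem _ _ (Nat.div_lt_self (List.length_pos_of_ne_nil d.2) one_lt_two)]
      exact List.getElem_mem _
    have h3 := three_way_len a f
    have hcnt : 1 ≤ a.count f := List.one_le_count_iff.mpr hp
    have hLlen : (sAsc (a.filter (fun x => decide (x < f)))).length
        = (a.filter (fun x => decide (x < f))).length := by
      simp only [sAsc, PySem.List.length_sorted]
    rw [if_neg h1, if_neg (by omega), sorted_decomp a f]
    rw [List.take_append, List.take_of_length_le (by rw [hLlen]; omega), hLlen,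
        List.take_append, List.take_replicate, List.length_replicate,
        min_eq_right (by omega : a.count f ≤ b.toNat - (a.filter (fun x => decide (x < f))).length)]
    rw [ih]
    have harg : (b - ((a.filter (fun x => decide (x < f))).length : Int)
        - ((a.length : Int) - (a.filter (fun x => decide (x < f))).length
            - (a.filter (fun x => decide (f < x))).length)).toNat
        = b.toNat - (a.filter (fun x => decide (x < f))).length - a.count f := by omega
    rw [harg, List.sum_append, List.sum_append, sum_sAsc, List.sum_replicate, nsmul_eq_mul]
    have hcast : ((a.count f : Nat) : Int)
        = (a.length : Int) - (a.filter (fun x => decide (x < f))).length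
          - (a.filter (fun x => decide (f < x))).length := by omega
    rw [hcast]
    ring
  | case5 a b c d =>
    rcases not_and_or.mp d with h | h
    · have hb : b.toNat = 0 := by omega
      simp [hb]
    · have ha : a = [] := not_not.mp h
      subst ha
      simp [sAsc, PySem.List.sorted]

lemma sumLargestAux_spec (xs : List Int) (j total : Int) :
    sumLargestAux xs j total = total + ((sAsc xs).drop (xs.length - j.toNat)).sum := by
  fun_induction sumLargestAux xs j total with
  | case1 a b c d e =>
    have h0 : a.length - b.toNat = 0 := by omega
    rw [h0, List.drop_zero, sum_sAsc]
  | case2 a b c d e f hi h1 ih =>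
    have hhi : hi = a.filter (fun x => decide (f < x)) := by
      simp only [hi]; exact unattach_filter_gt a f
    rw [hhi] at h1 ih
    have hp : f ∈ a := by
      show a.getD (a.length / 2) 0 ∈ a
      rw [List.getD_eq_getElem _ _ (Nat.div_lt_self (List.length_pos_of_ne_nil d.2) one_lt_two)]
      exact List.getElem_mem _
    have h3 := three_way_len a f
    have hcnt : 1 ≤ a.count f := List.one_le_count_iff.mpr hp
    have hLlen : (sAsc (a.filter (fun x => decide (x < f)))).length
        = (a.filter (fun x => decide (x < f))).length := by
      simp only [sAsc, PySem.List.length_sorted]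
    rw [if_pos h1, sorted_decomp a f]
    rw [List.drop_append, List.drop_eq_nil_of_le (by rw [hLlen]; omega), hLlen,
        List.drop_append, List.drop_replicate, List.length_replicate, List.nil_append]
    have e1 : a.count f - (a.length - b.toNat - (a.filter (fun x => decide (x < f))).length) = 0 := by
      omega
    have e2 : a.length - b.toNat - (a.filter (fun x => decide (x < f))).length - a.count f
        = (a.filter (fun x => decide (f < x))).length - b.toNat := by omega
    rw [e1, e2, List.replicate_zero, List.nil_append, ih]
  | case3 a b c d e f lo hi nq h1 h2 =>
    have hlo : lo = a.filter (fun x => decide (x < f)) := by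
      simp only [lo]; exact unattach_filter_lt a f
    have hhi : hi = a.filter (fun x => decide (f < x)) := by
      simp only [hi]; exact unattach_filter_gt a f
    have hnq : nq = (a.length : Int) - (a.filter (fun x => decide (x < f))).length
        - (a.filter (fun x => decide (f < x))).length := by
      simp only [nq, hlo, hhi]
    rw [hhi] at h1
    rw [hnq, hhi] at h2
    have hp : f ∈ a := by
      show a.getD (a.length / 2) 0 ∈ a
      rw [List.getD_eq_getElem _ _ (Nat.div_lt_self (List.length_pos_of_ne_nil d.2) one_lt_two)]
      exact List.getElem_mem _
    have h3 := three_way_len a f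
    have hcnt : 1 ≤ a.count f := List.one_le_count_iff.mpr hp
    have hLlen : (sAsc (a.filter (fun x => decide (x < f)))).length
        = (a.filter (fun x => decide (x < f))).length := by
      simp only [sAsc, PySem.List.length_sorted]
    rw [if_neg h1, if_pos (by omega), sorted_decomp a f]
    rw [List.drop_append, List.drop_eq_nil_of_le (by rw [hLlen]; omega), hLlen,
        List.drop_append, List.drop_replicate, List.length_replicate, List.nil_append]
    have e1 : a.length - b.toNat - (a.filter (fun x => decide (x < f))).length - a.count f = 0 := by
      omega
    have e2 : a.count f - (a.length - b.toNat - (a.filter (fun x => decide (x < f))).length)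
        = b.toNat - (a.filter (fun x => decide (f < x))).length := by omega
    rw [e1, e2, List.drop_zero, List.sum_append, List.sum_replicate, nsmul_eq_mul, sum_sAsc]
    have hcast : ((b.toNat - (a.filter (fun x => decide (f < x))).length : Nat) : Int)
        = b - (a.filter (fun x => decide (f < x))).length := by omega
    rw [hcast]
    ring
  | case4 a b c d e f lo hi nq h1 h2 ih =>
    have hlo : lo = a.filter (fun x => decide (x < f)) := by
      simp only [lo]; exact unattach_filter_lt a f
    have hhi : hi = a.filter (fun x => decide (f < x)) := by
      simp only [hi]; exact unattach_filter_gt a f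
    have hnq : nq = (a.length : Int) - (a.filter (fun x => decide (x < f))).length
        - (a.filter (fun x => decide (f < x))).length := by
      simp only [nq, hlo, hhi]
    rw [hhi] at h1
    rw [hnq, hhi] at h2
    rw [hlo, hhi, hnq] at ih
    have hp : f ∈ a := by
      show a.getD (a.length / 2) 0 ∈ a
      rw [List.getD_eq_getElem _ _ (Nat.div_lt_self (List.length_pos_of_ne_nil d.2) one_lt_two)]
      exact List.getElem_mem _
    have h3 := three_way_len a f
    have hcnt : 1 ≤ a.count f := List.one_le_count_iff.mpr hp
    have hLlen : (sAsc (a.filter (fun x => decide (x < f)))).length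
        = (a.filter (fun x => decide (x < f))).length := by
      simp only [sAsc, PySem.List.length_sorted]
    rw [if_neg h1, if_neg (by omega), sorted_decomp a f]
    rw [List.drop_append, hLlen]
    have e1 : a.length - b.toNat - (a.filter (fun x => decide (x < f))).length = 0 := by omega
    rw [e1, List.drop_zero, ih]
    have harg : (a.filter (fun x => decide (x < f))).length
        - (b - ((a.filter (fun x => decide (f < x))).length : Int)
            - ((a.length : Int) - (a.filter (fun x => decide (x < f))).length
              - (a.filter (fun x => decide (f < x))).length)).toNat
        = a.length - b.toNat := by omega
    rw [harg, List.sum_append, List.sum_append, List.sum_replicate, nsmul_eq_mul, sum_sAsc]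
    have hcast : ((a.count f : Nat) : Int)
        = (a.length : Int) - (a.filter (fun x => decide (x < f))).length
          - (a.filter (fun x => decide (f < x))).length := by omega
    rw [hcast]
    ring
  | case5 a b c d =>
    rcases not_and_or.mp d with h | h
    · have hb : b.toNat = 0 := by omega
      rw [hb, Nat.sub_zero, List.drop_eq_nil_of_le (by simp [sAsc, PySem.List.length_sorted])]
      simp
    · have ha : a = [] := not_not.mp h
      subst ha
      simp [sAsc, PySem.List.sorted]

lemma clampIdx_of_le_neg (n : Nat) (a : Int) (h : a ≤ -(n : Int)) : PySem.List.clampIdx n a = 0 := by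
  unfold PySem.List.clampIdx
  split <;> (try split) <;> omega
lemma clampIdx_of_ge (n : Nat) (a : Int) (h : (n : Int) ≤ a) : PySem.List.clampIdx n a = n := by
  unfold PySem.List.clampIdx
  split <;> (try split) <;> omega
lemma clampIdx_of_between (n : Nat) (a : Int) (h0 : 0 ≤ a) (h1 : a ≤ (n : Int)) :
    PySem.List.clampIdx n a = a.toNat := by
  unfold PySem.List.clampIdx
  split <;> (try split) <;> omega
lemma slice_none_some (xs : List Int) (b : Int) :
    PySem.List.slice xs none (some b) = xs.take (PySem.List.clampIdx xs.length b) := by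
  unfold PySem.List.slice
  simp

lemma splits_eq (w : List Int) :
    (PySem.List.pyRange 0 ((w.length : Int) - 1) 1).foldl
      (fun acc i => acc ++ [PySem.List.pyGetD w i 0 + PySem.List.pyGetD w (i + 1) 0]) []
    = (w.zip (PySem.List.slice w (some 1) none)).map (fun p => p.1 + p.2) := by
  rw [PySem.List.foldl_append_singleton_eq_map, PySem.List.slice_from_one, List.nil_append]
  apply List.ext_getElem
  · simp [PySem.List.length_pyRange_one, List.length_zip]
  · intro i h1 h2
    rw [List.length_map, PySem.List.length_pyRange_one] at h1
    have hi1 : i + 1 < w.length := by omega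
    simp only [List.getElem_map, PySem.List.getElem_pyRange_one, List.getElem_zip, zero_add]
    have c1 : ((i : Int)) + 1 = ((i + 1 : Nat) : Int) := by push_cast; ring
    rw [c1, PySem.List.pyGetD_natCast, PySem.List.pyGetD_natCast,
        List.getD_eq_getElem _ _ (by omega), List.getD_eq_getElem _ _ hi1,
        List.getElem_tail]

theorem putMarbles_agree (weights : List Int) (k : Int) (hpre : Pre_putMarbles weights k) :
    putMarbles weights k = putMarbles_alt weights k := by
  simp only [putMarbles, putMarbles_alt]
  rw [splits_eq]
  rw [sumSmallestAux_spec, sumLargestAux_spec, zero_add, zero_add]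
  set sp := (weights.zip (PySem.List.slice weights (some 1) none)).map (fun p => p.1 + p.2) with hsp
  show (PySem.List.slice (sAsc sp) (some (((sAsc sp).length : Int) - (k - 1))) none).sum
      - (PySem.List.slice (sAsc sp) none (some (k - 1))).sum
    = ((sAsc sp).drop (sp.length - (k - 1).toNat)).sum - ((sAsc sp).take (k - 1).toNat).sum
  have hsl : (sAsc sp).length = sp.length := by simp [sAsc, PySem.List.length_sorted]
  have hsp_len : sp.length + 1 = weights.length ∨ (sp.length = 0 ∧ weights.length = 0) := by
    rcases weights with _ | ⟨a, t⟩
    · right; simp [hsp]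
    · left; simp [hsp, PySem.List.slice_from_one, List.length_zip]
  rw [PySem.List.slice_some_none, slice_none_some, hsl]
  rcases Nat.eq_zero_or_pos sp.length with hm | hm
  · -- splits empty (weights has ≤ 1 element)
    have h0 : sp = [] := List.eq_nil_of_length_eq_zero hm
    have h0' : sAsc ([] : List Int) = [] := rfl
    simp [h0, h0']
  · -- sp nonempty; m := sp.length ≥ 1, weights.length = m + 1 ≥ 2
    have hw : weights.length = sp.length + 1 := by omega
    rcases hpre with h | h | h | h
    · omega
    · -- 1 ≤ k ≤ n : the in-range case
      rw [clampIdx_of_between _ _ (by omega) (by omega),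
          clampIdx_of_between _ _ (by omega) (by omega)]
      have : ((sp.length : Int) - (k - 1)).toNat = sp.length - (k - 1).toNat := by omega
      rw [this]
    · -- k ≤ 2 - n : everything empty
      rw [clampIdx_of_ge _ _ (by omega), clampIdx_of_le_neg _ _ (by omega)]
      have e1 : sp.length - (k - 1).toNat = sp.length := by omega
      have e2 : (k - 1).toNat = 0 := by omega
      rw [e1, e2]
    · -- 2n - 1 ≤ k : both slices are the whole list
      rw [clampIdx_of_le_neg _ _ (by omega), clampIdx_of_ge _ _ (by omega)]
      have e1 : sp.length - (k - 1).toNat = 0 := by omega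
      rw [e1, List.take_of_length_le (by rw [hsl]), List.take_of_length_le (by rw [hsl]; omega)]

-- ===== VERDICT (by name: the statement is the Claim_ definition above) =====
theorem putMarbles_spec : Claim_equal_putMarbles := by
  intro weights k _ hpre
  unfold Spec_putMarbles
  exact putMarbles_agree weights k hpre
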